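-- pv_equiv track=rewrite | github.com/skfo763/Problem_Solving | psroadmap/bruteforce/1759.py | get_available_set
-- ===== SOURCE A (Python) =====
-- def get_available_set(input_data, k):
--     if k == 1:
--         return input_data
--     else:
--         prev_data = get_available_set(input_data, k - 1)
--         res = []
--         for prev_seq in prev_data:
--             for curr in input_data:
--                 if prev_seq[-1] >= curr:
--                     continue
--                 else:
--                     res.append(prev_seq + curr)
--         return res
-- ===== SOURCE B (Python) =====
-- def get_available_set(input_data, k):
--     if k == 1:
--         return input_data
--
--     def extend(seq, remaining):
--         # depth-first: all strictly-increasing completions of seq, remaining more picks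
--         if remaining <= 0:
--             return [seq]
--         last = seq[-1]
--         out = []
--         for curr in input_data:
--             if last < curr:
--                 out.extend(extend(seq + curr, remaining - 1))
--         return out
--
--     res = []
--     for s in input_data:
--         res.extend(extend(s, k - 1))
--     return res
-- ===== Notes on version B (the rewrite author's own statement) =====
-- stated objective: alternative
-- what changed: Replaces A's level-by-level breadth-first construction (which materializes every intermediate length-j list via recursion on k) with a depth-first recursion that extends one sequence at a time to full length, producing the same output order without storing intermediate levels.
import Mathlib
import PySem

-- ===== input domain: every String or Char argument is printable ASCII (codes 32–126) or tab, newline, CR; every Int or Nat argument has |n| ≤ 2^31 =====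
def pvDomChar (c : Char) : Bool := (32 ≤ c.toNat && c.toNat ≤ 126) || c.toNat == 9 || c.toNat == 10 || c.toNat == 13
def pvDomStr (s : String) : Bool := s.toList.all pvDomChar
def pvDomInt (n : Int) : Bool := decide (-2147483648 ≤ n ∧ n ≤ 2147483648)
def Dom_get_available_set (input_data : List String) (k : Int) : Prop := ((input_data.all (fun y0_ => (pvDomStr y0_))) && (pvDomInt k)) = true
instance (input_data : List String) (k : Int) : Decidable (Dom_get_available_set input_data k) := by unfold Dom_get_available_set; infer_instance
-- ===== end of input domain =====

-- B replaces A's breadth-first level construction by an equivalent depth-first recursion (objective: alternative, no speed claim).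

-- ===== PORT A =====
-- 'prev_seq[-1] >= curr' : skip condition; prev_seq[-1] is a 1-char string compared to curr.
-- On an empty prev_seq Python raises IndexError (excluded by Pre_); the none branch is unreachable there.
def pvSkipA (prev_seq curr : String) : Bool :=
  match PySem.Str.pyGet? prev_seq (-1) with
  | some c => decide (curr ≤ String.ofList [c])
  | none => true

def get_available_set (input_data : List String) (k : Int) : List String :=
  if k = 1 then input_data
  else if k < 1 then input_data   -- totality guard: Python recurses forever (RecursionError) for k < 1; outside Pre_
  else
    let prev_data := get_available_set input_data (k - 1)
    prev_data.foldl (fun res prev_seq =>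
      input_data.foldl (fun res curr =>
        if pvSkipA prev_seq curr then res else res ++ [prev_seq ++ curr]) res) []
termination_by k.toNat
decreasing_by omega

-- ===== PORT B =====
-- 'last < curr' in B, with last = seq[-1] (IndexError on empty seq, excluded by Pre_).
def pvGoB (seq curr : String) : Bool :=
  match PySem.Str.pyGet? seq (-1) with
  | some c => decide (String.ofList [c] < curr)
  | none => false

-- the inner 'extend' of Source B; 'remaining' is a count (totality: Python diverges for k < 1, outside Pre_)
def pvExtendB (input_data : List String) (seq : String) : Nat → List String
  | 0 => [seq]
  | r + 1 => input_data.foldl (fun out curr =>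
      if pvGoB seq curr then out ++ pvExtendB input_data (seq ++ curr) r else out) []

def get_available_set_alt (input_data : List String) (k : Int) : List String :=
  if k = 1 then input_data
  else input_data.foldl (fun res s => res ++ pvExtendB input_data s (k - 1).toNat) []

-- ===== PRECONDITION & SPEC =====
-- Pre_ excludes exactly the inputs where Python A raises: k < 1 (unbounded recursion, RecursionError)
-- and, for k ≥ 2, an empty string in input_data (IndexError on prev_seq[-1]).
def Pre_get_available_set (input_data : List String) (k : Int) : Prop :=
  1 ≤ k ∧ (1 < k → "" ∉ input_data)
instance (input_data : List String) (k : Int) : Decidable (Pre_get_available_set input_data k) := by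
  unfold Pre_get_available_set; infer_instance

def pvWitness_get_available_set : List String × Int := (["a", "b", "c"], 2)

def Spec_get_available_set (input_data : List String) (k : Int) (out : List String) : Prop := out = get_available_set_alt input_data k
instance (input_data : List String) (k : Int) (out : List String) : Decidable (Spec_get_available_set input_data k out) := by unfold Spec_get_available_set; infer_instance

-- ===== CLAIM (what is proved, stated in full; the proofs are below) =====
def Claim_equal_get_available_set : Prop := ∀ (input_data : List String) (k : Int), Dom_get_available_set input_data k → Pre_get_available_set input_data k → Spec_get_available_set input_data k (get_available_set input_data k)

-- ===== LEMMAS AND PROOFS =====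

-- the skip test of A is the negation of the go test of B
theorem pvSkipA_eq_not_goB (p q : String) : pvSkipA p q = !pvGoB p q := by
  unfold pvSkipA pvGoB
  cases PySem.Str.pyGet? p (-1) with
  | none => rfl
  | some ch =>
      show decide (q ≤ String.ofList [ch]) = !decide (String.ofList [ch] < q)
      rw [← decide_not]
      exact decide_eq_decide.mpr not_lt.symm

-- flatMap characterisation of B's extend
theorem pvExtendB_succ (input : List String) (seq : String) (r : Nat) :
    pvExtendB input seq (r + 1)
      = input.flatMap (fun c => if pvGoB seq c then pvExtendB input (seq ++ c) r else []) := by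
  show input.foldl (fun out curr =>
      if pvGoB seq curr then out ++ pvExtendB input (seq ++ curr) r else out) [] = _
  have h : (fun (out : List String) curr =>
      if pvGoB seq curr then out ++ pvExtendB input (seq ++ curr) r else out)
      = fun out curr => out ++ (if pvGoB seq curr then pvExtendB input (seq ++ curr) r else []) := by
    funext out curr; split <;> simp
  rw [h, PySem.List.foldl_append_eq_flatMap]
  simp

-- one-step extension used on A's side
def pvG (input : List String) (p : String) : List String :=
  input.flatMap (fun c => if pvGoB p c then [p ++ c] else [])

-- extending each depth-r completion by one more character = depth-(r+1) completions (DFS vs BFS swap)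
theorem pvExtendB_flatMap_g (input : List String) (seq : String) (r : Nat) :
    (pvExtendB input seq r).flatMap (pvG input) = pvExtendB input seq (r + 1) := by
  induction r generalizing seq with
  | zero =>
      rw [pvExtendB_succ]
      simp [pvExtendB, pvG]
  | succ n ih =>
      rw [pvExtendB_succ, pvExtendB_succ, List.flatMap_assoc]
      congr 1
      funext c
      split <;> simp [ih]

-- A's double loop body, rewritten
theorem pvInner_eq (input : List String) (p : String) (res : List String) :
    input.foldl (fun res curr =>
      if pvSkipA p curr then res else res ++ [p ++ curr]) res = res ++ pvG input p := by
  have h : (fun (res : List String) curr =>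
      if pvSkipA p curr then res else res ++ [p ++ curr])
      = fun res curr => res ++ (if pvGoB p curr then [p ++ curr] else []) := by
    funext res curr
    rw [pvSkipA_eq_not_goB]
    cases pvGoB p curr <;> simp
  rw [h, PySem.List.foldl_append_eq_flatMap]
  rfl

-- the main induction: A at k = n+1 equals B's DFS over input with remaining = n
theorem pv_main (input : List String) (n : Nat) :
    get_available_set input ((n : Int) + 1)
      = input.flatMap (fun s => pvExtendB input s n) := by
  induction n with
  | zero => simp [get_available_set, pvExtendB]
  | succ m ih =>
      rw [show (((m + 1 : Nat) : Int) + 1) = ((m : Int) + 1 + 1) by push_cast; ring]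
      unfold get_available_set
      rw [if_neg (by omega), if_neg (by omega)]
      rw [show ((m : Int) + 1 + 1 - 1) = ((m : Int) + 1) by ring, ih]
      have houter : ∀ (L acc : List String),
          L.foldl (fun res prev_seq =>
            input.foldl (fun res curr =>
              if pvSkipA prev_seq curr then res else res ++ [prev_seq ++ curr]) res) acc
          = acc ++ L.flatMap (pvG input) := by
        intro L
        induction L with
        | nil => simp
        | cons x xs ihl =>
            intro acc
            simp only [List.foldl_cons, List.flatMap_cons]
            rw [pvInner_eq, ihl, List.append_assoc]
      rw [houter, List.flatMap_assoc]
      simp only [List.nil_append]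
      congr 1
      funext s
      rw [pvExtendB_flatMap_g]

-- ===== VERDICT (by name: the statement is the Claim_ definition above) =====
theorem get_available_set_spec : Claim_equal_get_available_set := by
  intro input k _hdom hpre
  unfold Spec_get_available_set get_available_set_alt
  rcases hpre with ⟨hk, -⟩
  have hn : k = ((k - 1).toNat : Int) + 1 := by omega
  by_cases h1 : k = 1
  · subst h1; simp [get_available_set]
  · rw [if_neg h1, hn, pv_main]
    rw [PySem.List.foldl_append_eq_flatMap]
    simp
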